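-- pv_equiv track=rewrite | github.com/matthew-tendler/better-ball-caddie | app.py | bad_streak
-- ===== SOURCE A (Python) =====
-- from typing import List
--
-- BAD_SCORE  = 2            # ≤ D is “trouble”
--
-- def bad_streak(grades: List[int]) -> int:
--     """Count how many D/F in a row at the end."""
--     s = 0
--     for v in reversed(grades):
--         if v <= BAD_SCORE:
--             s += 1
--         else:
--             break
--     return s
-- ===== SOURCE B (Python) =====
-- from typing import List
--
-- BAD_SCORE = 2
--
--
-- def bad_streak(grades: List[int]) -> int:
--     """Count how many D/F in a row at the end."""
--     last_good = -1
--     for i, v in enumerate(grades):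
--         if v > BAD_SCORE:
--             last_good = i
--     return len(grades) - last_good - 1
-- ===== Notes on version B (the rewrite author's own statement) =====
-- stated objective: alternative
-- what changed: Replaced the reversed-iteration early-break counter with a forward enumerate scan that records the index of the last good grade and returns len(grades) - last_good - 1.
import Mathlib
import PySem

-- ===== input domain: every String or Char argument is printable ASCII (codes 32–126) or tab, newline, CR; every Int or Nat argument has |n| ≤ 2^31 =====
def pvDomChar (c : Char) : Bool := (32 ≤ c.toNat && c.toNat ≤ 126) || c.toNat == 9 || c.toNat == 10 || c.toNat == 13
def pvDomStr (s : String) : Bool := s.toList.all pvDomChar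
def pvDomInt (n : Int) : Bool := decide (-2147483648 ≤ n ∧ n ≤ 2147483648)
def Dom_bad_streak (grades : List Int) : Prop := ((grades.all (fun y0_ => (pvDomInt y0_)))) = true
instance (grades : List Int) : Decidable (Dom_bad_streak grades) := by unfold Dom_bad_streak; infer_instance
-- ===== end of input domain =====

-- B replaces A's reversed early-break counter with a forward enumerate scan tracking the last good index, plus arithmetic (alternative decomposition, same cost class).


-- ===== PORT A =====
-- 'for v in reversed(grades): if v <= 2: s += 1 else: break' as structural recursion over grades.reverse
def badStreakLoop (s : Int) : List Int → Int
  | [] => s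
  | v :: rest => if v ≤ 2 then badStreakLoop (s + 1) rest else s

def bad_streak (grades : List Int) : Int := badStreakLoop 0 grades.reverse

-- ===== PORT B =====
def bad_streak_alt (grades : List Int) : Int :=
  let last_good : Int :=
    (PySem.List.enumerate grades).foldl (fun acc iv => if iv.2 > 2 then iv.1 else acc) (-1)
  (grades.length : Int) - last_good - 1

-- ===== PRECONDITION & SPEC =====
def Spec_bad_streak (grades : List Int) (out : Int) : Prop := out = bad_streak_alt grades
instance (grades : List Int) (out : Int) : Decidable (Spec_bad_streak grades out) := by unfold Spec_bad_streak; infer_instance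

-- ===== CLAIM (what is proved, stated in full; the proofs are below) =====
def Claim_equal_bad_streak : Prop := ∀ (grades : List Int), Dom_bad_streak grades → Spec_bad_streak grades (bad_streak grades)

-- ===== LEMMAS AND PROOFS =====

theorem badStreakLoop_shift (s : Int) (l : List Int) :
    badStreakLoop s l = s + badStreakLoop 0 l := by
  induction l generalizing s with
  | nil => simp [badStreakLoop]
  | cons v rest ih =>
    simp only [badStreakLoop]
    split_ifs with h
    · rw [ih (s + 1), ih (0 + 1)]; ring
    · ring

theorem fold_lastGood_append (xs : List Int) (x : Int) (s : Int) (acc : Int) :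
    (PySem.List.enumerate (xs ++ [x]) s).foldl (fun acc iv => if iv.2 > 2 then iv.1 else acc) acc
      = (if x > 2 then (s + xs.length : Int)
         else (PySem.List.enumerate xs s).foldl (fun acc iv => if iv.2 > 2 then iv.1 else acc) acc) := by
  rw [PySem.List.enumerate_append]
  simp [PySem.List.enumerate]

theorem main_eq (grades : List Int) : bad_streak grades = bad_streak_alt grades := by
  induction grades using List.reverseRecOn with
  | nil => simp [bad_streak, bad_streak_alt, badStreakLoop, PySem.List.enumerate]
  | append_singleton xs x ih =>
    simp only [bad_streak, bad_streak_alt] at *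
    rw [List.reverse_append]
    simp only [List.reverse_singleton, List.singleton_append, badStreakLoop]
    rw [fold_lastGood_append]
    by_cases hx : x ≤ 2
    · rw [if_pos hx, if_neg (by omega), badStreakLoop_shift, ih]
      simp only [List.length_append, List.length_singleton]
      push_cast; ring
    · rw [if_neg hx, if_pos (by omega)]
      simp only [List.length_append, List.length_singleton]
      push_cast; ring

-- ===== VERDICT (by name: the statement is the Claim_ definition above) =====
theorem bad_streak_spec : Claim_equal_bad_streak := by
  intro grades _
  exact main_eq grades
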